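-- pv_equiv track=rewrite | github.com/Rohitkdm2666/SchemaIQ-backend | services/ai_agent/context_generator.py | _generate_generic_table_description
-- ===== SOURCE A (Python) =====
-- from typing import Dict, List, Optional, Tuple
--
-- def _generate_generic_table_description(table_name: str, table: Dict) -> str:
--     """
--     Generate generic table description using intelligent inference
--     """
--     # Analyze table name patterns
--     name_lower = table_name.lower()
--
--     # Common table type patterns
--     if any(word in name_lower for word in ['user', 'customer', 'client', 'member']):
--         return f"{table_name.title()} profiles and account information"
--     elif any(word in name_lower for word in ['order', 'transaction', 'purchase', 'sale']):
--         return f"{table_name.title()} records and transaction history"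
--     elif any(word in name_lower for word in ['product', 'item', 'inventory', 'catalog']):
--         return f"{table_name.title()} information and catalog data"
--     elif any(word in name_lower for word in ['payment', 'billing', 'invoice']):
--         return f"{table_name.title()} processing and financial records"
--     elif any(word in name_lower for word in ['log', 'audit', 'history']):
--         return f"{table_name.title()} tracking and audit trail information"
--     elif any(word in name_lower for word in ['config', 'setting', 'preference']):
--         return f"{table_name.title()} configuration and system preferences"
--     elif any(word in name_lower for word in ['report', 'analytics', 'metric']):
--         return f"{table_name.title()} data and performance metrics"
--     else:
--         return f"{table_name.title()} data and related information"
-- ===== SOURCE B (Python) =====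
-- _SUFFIXES = [
--     "profiles and account information",
--     "records and transaction history",
--     "information and catalog data",
--     "processing and financial records",
--     "tracking and audit trail information",
--     "configuration and system preferences",
--     "data and performance metrics",
--     "data and related information",
-- ]
--
-- _PRIORITY = {
--     'user': 0, 'customer': 0, 'client': 0, 'member': 0,
--     'order': 1, 'transaction': 1, 'purchase': 1, 'sale': 1,
--     'product': 2, 'item': 2, 'inventory': 2, 'catalog': 2,
--     'payment': 3, 'billing': 3, 'invoice': 3,
--     'log': 4, 'audit': 4, 'history': 4,
--     'config': 5, 'setting': 5, 'preference': 5,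
--     'report': 6, 'analytics': 6, 'metric': 6,
-- }
--
--
-- def _generate_generic_table_description(table_name: str, table) -> str:
--     # Scan every substring of length 3..11 once; a hash lookup gives each
--     # keyword's category priority, and the smallest priority found wins.
--     s = table_name.lower()
--     best = min(
--         (_PRIORITY[s[i:i + n]]
--          for i in range(len(s))
--          for n in range(3, 12)
--          if s[i:i + n] in _PRIORITY),
--         default=7,
--     )
--     return f"{table_name.title()} {_SUFFIXES[best]}"
-- ===== Notes on version B (the rewrite author's own statement) =====
-- stated objective: alternative
-- what changed: Instead of testing each of the 24 keywords for containment in an if/elif chain, B enumerates every substring of length 3..11 of the lowered name once, looks each up in a keyword->priority hash table, and takes the minimum priority found (default 7) as an index into a suffix table.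
import Mathlib
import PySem

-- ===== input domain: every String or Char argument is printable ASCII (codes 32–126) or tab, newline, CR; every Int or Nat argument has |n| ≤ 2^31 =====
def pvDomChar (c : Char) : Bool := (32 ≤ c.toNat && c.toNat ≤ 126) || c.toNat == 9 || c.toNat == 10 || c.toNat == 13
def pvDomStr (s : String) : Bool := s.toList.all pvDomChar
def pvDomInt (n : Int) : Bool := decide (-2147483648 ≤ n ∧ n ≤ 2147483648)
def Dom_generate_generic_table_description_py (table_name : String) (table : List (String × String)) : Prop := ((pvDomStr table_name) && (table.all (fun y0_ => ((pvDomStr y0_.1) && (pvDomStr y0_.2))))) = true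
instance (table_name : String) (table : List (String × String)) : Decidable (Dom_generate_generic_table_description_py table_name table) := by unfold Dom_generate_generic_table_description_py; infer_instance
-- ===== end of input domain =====

-- B replaces A's 24 per-keyword containment tests (an if/elif chain) by a single scan over all
-- substrings of length 3..11 of the lowered name, each looked up in a keyword→priority table;
-- the minimum priority found (default 7) indexes a suffix table (alternative algorithm, same cost class).

-- str.title(), ported by hand over List Char: a char is uppercased iff the previous char is not
-- alphabetic; exact for the ASCII domain (where Python's "cased" = alphabetic). Used by both ports
-- (both Pythons call table_name.title()).
def pvTitleGo : List Char → Bool → List Char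
  | [], _ => []
  | c :: cs, prevAlpha =>
    (if PySem.Chars.isalpha c then
       (if prevAlpha then PySem.Chars.lowerChar c else PySem.Chars.upperChar c)
     else c) :: pvTitleGo cs (PySem.Chars.isalpha c)

def pvTitle (s : String) : List Char := pvTitleGo s.toList false

-- ===== PORT A =====
def generate_generic_table_description_py (table_name : String) (table : List (String × String)) : String :=
  let name_lower := PySem.Chars.lower table_name.toList
  if (["user", "customer", "client", "member"] : List String).any (fun w => PySem.Chars.isIn w.toList name_lower) then
    String.ofList (pvTitle table_name ++ " profiles and account information".toList)
  else if (["order", "transaction", "purchase", "sale"] : List String).any (fun w => PySem.Chars.isIn w.toList name_lower) then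
    String.ofList (pvTitle table_name ++ " records and transaction history".toList)
  else if (["product", "item", "inventory", "catalog"] : List String).any (fun w => PySem.Chars.isIn w.toList name_lower) then
    String.ofList (pvTitle table_name ++ " information and catalog data".toList)
  else if (["payment", "billing", "invoice"] : List String).any (fun w => PySem.Chars.isIn w.toList name_lower) then
    String.ofList (pvTitle table_name ++ " processing and financial records".toList)
  else if (["log", "audit", "history"] : List String).any (fun w => PySem.Chars.isIn w.toList name_lower) then
    String.ofList (pvTitle table_name ++ " tracking and audit trail information".toList)
  else if (["config", "setting", "preference"] : List String).any (fun w => PySem.Chars.isIn w.toList name_lower) then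
    String.ofList (pvTitle table_name ++ " configuration and system preferences".toList)
  else if (["report", "analytics", "metric"] : List String).any (fun w => PySem.Chars.isIn w.toList name_lower) then
    String.ofList (pvTitle table_name ++ " data and performance metrics".toList)
  else
    String.ofList (pvTitle table_name ++ " data and related information".toList)

-- ===== PORT B =====
def pvSuffixes : List String :=
  [ "profiles and account information",
    "records and transaction history",
    "information and catalog data",
    "processing and financial records",
    "tracking and audit trail information",
    "configuration and system preferences",
    "data and performance metrics",
    "data and related information" ]

-- Source B's _PRIORITY dict literal (keys as List Char, since lookups are on slices of a char list)
def pvPrioList : List (List Char × Nat) :=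
  [ ("user".toList, 0), ("customer".toList, 0), ("client".toList, 0), ("member".toList, 0),
    ("order".toList, 1), ("transaction".toList, 1), ("purchase".toList, 1), ("sale".toList, 1),
    ("product".toList, 2), ("item".toList, 2), ("inventory".toList, 2), ("catalog".toList, 2),
    ("payment".toList, 3), ("billing".toList, 3), ("invoice".toList, 3),
    ("log".toList, 4), ("audit".toList, 4), ("history".toList, 4),
    ("config".toList, 5), ("setting".toList, 5), ("preference".toList, 5),
    ("report".toList, 6), ("analytics".toList, 6), ("metric".toList, 6) ]

def pvPrio : PySem.Dict (List Char) Nat := PySem.Dict.ofList pvPrioList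

-- the comprehension (_PRIORITY[s[i:i+n]] for i in range(len(s)) for n in range(3,12) if s[i:i+n] in _PRIORITY)
def pvHits (s : List Char) : List Nat :=
  (PySem.List.pyRange 0 (s.length : Int) 1).flatMap (fun i =>
    (PySem.List.pyRange 3 12 1).filterMap (fun n =>
      pvPrio.get? (PySem.List.slice s (some i) (some (i + n)))))

def generate_generic_table_description_py_alt (table_name : String) (table : List (String × String)) : String :=
  let s := PySem.Chars.lower table_name.toList
  let best := PySem.List.minD (pvHits s) (fun x => x) 7
  -- _SUFFIXES[best]: best ≤ 7 always, so plain list indexing is in range; getD is exact here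
  String.ofList (pvTitle table_name ++ ' ' :: (pvSuffixes.getD best "").toList)

-- ===== PRECONDITION & SPEC =====
def Spec_generate_generic_table_description_py (table_name : String) (table : List (String × String)) (out : String) : Prop := out = generate_generic_table_description_py_alt table_name table
instance (table_name : String) (table : List (String × String)) (out : String) : Decidable (Spec_generate_generic_table_description_py table_name table out) := by unfold Spec_generate_generic_table_description_py; infer_instance

-- ===== CLAIM (what is proved, stated in full; the proofs are below) =====
def Claim_equal_generate_generic_table_description_py : Prop := ∀ (table_name : String) (table : List (String × String)), Dom_generate_generic_table_description_py table_name table → Spec_generate_generic_table_description_py table_name table (generate_generic_table_description_py table_name table)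

-- ===== LEMMAS AND PROOFS =====

-- A's seven keyword categories, in branch order (proof-side view of A's conditions)
def pvCat : Nat → List String
  | 0 => ["user", "customer", "client", "member"]
  | 1 => ["order", "transaction", "purchase", "sale"]
  | 2 => ["product", "item", "inventory", "catalog"]
  | 3 => ["payment", "billing", "invoice"]
  | 4 => ["log", "audit", "history"]
  | 5 => ["config", "setting", "preference"]
  | 6 => ["report", "analytics", "metric"]
  | _ => []

def pvMatched (p : Nat) (s : List Char) : Bool :=
  (pvCat p).any (fun w => PySem.Chars.isIn w.toList s)

-- the value A's if/elif chain selects (as an index into pvSuffixes)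
def pvChain (s : List Char) : Nat :=
  if pvMatched 0 s then 0 else if pvMatched 1 s then 1 else if pvMatched 2 s then 2
  else if pvMatched 3 s then 3 else if pvMatched 4 s then 4 else if pvMatched 5 s then 5
  else if pvMatched 6 s then 6 else 7

lemma pvPrio_items : pvPrio.items = pvPrioList := by decide

lemma pvPrio_nodup : pvPrio.keys.Nodup := by decide

lemma pvPrio_get?_iff (w : List Char) (p : Nat) :
    pvPrio.get? w = some p ↔ (w, p) ∈ pvPrioList := by
  rw [PySem.Dict.get?_eq_some_iff_mem_items _ _ _ pvPrio_nodup, pvPrio_items]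

lemma pvPrioList_spec : ∀ x ∈ pvPrioList,
    x.2 ≤ 6 ∧ 3 ≤ x.1.length ∧ x.1.length < 12 ∧ ∃ u ∈ pvCat x.2, x.1 = u.toList := by decide

lemma pvCat_mem (p : Nat) (hp : p ≤ 6) : ∀ u ∈ pvCat p, (u.toList, p) ∈ pvPrioList := by
  interval_cases p <;> decide

lemma mem_pvHits (s : List Char) (p : Nat) :
    p ∈ pvHits s ↔ ∃ w, (w, p) ∈ pvPrioList ∧ PySem.Chars.isIn w s = true := by
  unfold pvHits
  simp only [List.mem_flatMap, List.mem_filterMap, PySem.List.mem_pyRange_one]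
  constructor
  · rintro ⟨i, ⟨hi0, _⟩, n, ⟨hn3, _⟩, hget⟩
    refine ⟨_, (pvPrio_get?_iff _ _).mp hget, ?_⟩
    rw [PySem.Chars.isIn_iff_infix, PySem.List.slice_toNat s hi0 (by omega)]
    exact ((s.drop i.toNat).take_prefix _).isInfix.trans (s.drop_suffix i.toNat).isInfix
  · rintro ⟨w, hmem, hin⟩
    obtain ⟨-, hw3', hw12', -⟩ := pvPrioList_spec _ hmem
    have hw3 : 3 ≤ w.length := hw3'
    have hw12 : w.length < 12 := hw12'
    obtain ⟨pre, suf, hs⟩ := (PySem.Chars.isIn_iff_infix _ _).mp hin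
    have hlen : pre.length + (w.length + suf.length) = s.length := by
      have := congrArg List.length hs; simpa using this
    have hslice : PySem.List.slice s (some (pre.length : Int))
        (some ((pre.length : Int) + (w.length : Int))) = w := by
      rw [PySem.List.slice_natCast_add, ← hs]
      simp
    refine ⟨(pre.length : Int), ⟨by exact_mod_cast Nat.zero_le _, by exact_mod_cast (by omega : pre.length < s.length)⟩,
      (w.length : Int), ⟨by exact_mod_cast hw3, by exact_mod_cast hw12⟩, ?_⟩
    rw [hslice]
    exact (pvPrio_get?_iff _ _).mpr hmem

lemma mem_pvHits' (s : List Char) (p : Nat) :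
    p ∈ pvHits s ↔ p ≤ 6 ∧ pvMatched p s = true := by
  rw [mem_pvHits]
  constructor
  · rintro ⟨w, hmem, hin⟩
    obtain ⟨h6, -, -, u, hu, rfl⟩ := pvPrioList_spec _ hmem
    refine ⟨h6, ?_⟩
    simp only [pvMatched, List.any_eq_true]
    exact ⟨u, hu, hin⟩
  · rintro ⟨h6, hm⟩
    simp only [pvMatched, List.any_eq_true] at hm
    obtain ⟨u, hu, hin⟩ := hm
    exact ⟨u.toList, pvCat_mem p h6 u hu, hin⟩

lemma pvChain_min (s : List Char) : ∀ p ∈ pvHits s, pvChain s ≤ p := by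
  intro p hp
  rw [mem_pvHits'] at hp
  obtain ⟨hp6, hm⟩ := hp
  unfold pvChain
  split_ifs with h0 h1 h2 h3 h4 h5 h6 <;> interval_cases p <;> simp_all

lemma pvChain_mem (s : List Char) : pvChain s = 7 ∨ pvChain s ∈ pvHits s := by
  unfold pvChain
  split_ifs with h0 h1 h2 h3 h4 h5 h6 <;>
    first
      | (left; rfl)
      | (right; rw [mem_pvHits']; exact ⟨by omega, by assumption⟩)

lemma pvMinD_eq_chain (s : List Char) :
    PySem.List.minD (pvHits s) (fun x => x) 7 = pvChain s := by
  rcases pvChain_mem s with h7 | hmem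
  · have hnil : pvHits s = [] := by
      rw [List.eq_nil_iff_forall_not_mem]
      intro p hp
      have h1 := pvChain_min s p hp
      rw [mem_pvHits'] at hp
      omega
    rw [hnil, h7]
    rfl
  · unfold PySem.List.minD
    obtain ⟨m, hm⟩ : ∃ m, PySem.List.min? (pvHits s) (fun x => x) = some m := by
      cases hmq : PySem.List.min? (pvHits s) (fun x => x) with
      | none => rw [PySem.List.min?_eq_none_iff] at hmq; rw [hmq] at hmem; simp at hmem
      | some m => exact ⟨m, rfl⟩
    rw [hm, Option.getD_some]
    have h1 := pvChain_min s m (PySem.List.min?_mem hm)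
    have h2 := PySem.List.min?_isMin hm (pvChain s) hmem
    omega

-- ===== VERDICT (by name: the statement is the Claim_ definition above) =====
theorem generate_generic_table_description_py_spec : Claim_equal_generate_generic_table_description_py := by
  intro table_name table _
  unfold Spec_generate_generic_table_description_py
  unfold generate_generic_table_description_py generate_generic_table_description_py_alt
  simp only []
  rw [pvMinD_eq_chain]
  unfold pvChain pvMatched
  simp only [pvCat]
  split_ifs <;>
    exact congrArg (fun l => String.ofList (pvTitle table_name ++ l)) (by decide)
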